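-- pv_equiv track=rewrite | github.com/mego7001/nova-hub | ui/hud_qml/controller_tools.py | preferred_user_mode
-- ===== SOURCE A (Python) =====
-- from typing import Any, Dict, List
--
-- def preferred_user_mode(rows: List[Dict[str, Any]], current: str) -> str:
--     allowed_ids = {str(row.get("id") or "") for row in rows if isinstance(row, dict)}
--     if str(current or "") in allowed_ids:
--         return str(current or "")
--     for row in rows:
--         if not isinstance(row, dict):
--             continue
--         mode_id = str(row.get("id") or "")
--         if mode_id and mode_id.lower() != "auto":
--             return mode_id
--     return "general"
-- ===== SOURCE B (Python) =====
-- from typing import Any, Dict, List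
--
-- def preferred_user_mode(rows: List[Dict[str, Any]], current: str) -> str:
--     current_found = False
--     first_fallback = None
--     for row in rows:
--         if not isinstance(row, dict):
--             continue
--         mode_id = str(row.get("id") or "")
--         if mode_id == str(current or ""):
--             current_found = True
--         if first_fallback is None and mode_id and mode_id.lower() != "auto":
--             first_fallback = mode_id
--     if current_found:
--         return str(current or "")
--     if first_fallback is not None:
--         return first_fallback
--     return "general"
-- ===== Notes on version B (the rewrite author's own statement) =====
-- stated objective: alternative
-- what changed: Replaces A's set-comprehension membership pass plus separate fallback scan with a single loop over rows maintaining a current-found flag and the first eligible fallback.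
import Mathlib
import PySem

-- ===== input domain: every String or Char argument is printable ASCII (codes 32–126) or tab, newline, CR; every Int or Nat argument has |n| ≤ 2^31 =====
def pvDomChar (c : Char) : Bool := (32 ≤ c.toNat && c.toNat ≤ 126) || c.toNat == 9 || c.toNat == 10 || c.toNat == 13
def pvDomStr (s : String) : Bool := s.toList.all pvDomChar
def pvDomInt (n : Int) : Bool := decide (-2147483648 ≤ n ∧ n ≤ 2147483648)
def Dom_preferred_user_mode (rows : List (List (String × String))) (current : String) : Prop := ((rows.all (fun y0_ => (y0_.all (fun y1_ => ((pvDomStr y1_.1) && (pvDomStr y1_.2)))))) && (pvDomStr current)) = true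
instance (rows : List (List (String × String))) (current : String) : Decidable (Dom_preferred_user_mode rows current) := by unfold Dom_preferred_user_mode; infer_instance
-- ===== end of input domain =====

-- B replaces A's set-comprehension membership pass plus separate fallback scan by a single
-- loop keeping a current-found flag and the first eligible fallback (alternative decomposition,
-- same cost; return value only, no mutation involved).

-- ===== PORT A =====
-- str(row.get("id") or "") for a str-valued dict: missing key and "" both give "", i.e. getD row "id" ""
-- (str(s) and "s or ''" are identities on non-empty strings). Likewise str(current or "") = current.
def pvModeId (row : List (String × String)) : String := PySem.Dict.getD (PySem.Dict.mk row) "id" ""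

-- the for-loop of A: first mode_id that is non-empty and lower() != "auto", else "general"
def pvFirstFallback (rows : List (List (String × String))) : String :=
  match rows with
  | [] => "general"
  | row :: rest =>
    let mode_id := pvModeId row
    if mode_id ≠ "" ∧ PySem.Str.lower mode_id ≠ "auto" then mode_id else pvFirstFallback rest

def preferred_user_mode (rows : List (List (String × String))) (current : String) : String :=
  let allowed_ids : PySem.Set String := PySem.Set.ofList (rows.map pvModeId)
  if current ∈ allowed_ids then current
  else pvFirstFallback rows

-- ===== PORT B =====
-- single pass: state = (current_found, first_fallback)
def pvStepB (current : String) (st : Bool × Option String) (row : List (String × String)) :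
    Bool × Option String :=
  let mode_id := PySem.Dict.getD (PySem.Dict.mk row) "id" ""
  let found := if mode_id = current then true else st.1
  let fb := match st.2 with
    | some f => some f
    | none => if mode_id ≠ "" ∧ PySem.Str.lower mode_id ≠ "auto" then some mode_id else none
  (found, fb)

def preferred_user_mode_alt (rows : List (List (String × String))) (current : String) : String :=
  let st := rows.foldl (pvStepB current) (false, none)
  if st.1 then current
  else match st.2 with
    | some f => f
    | none => "general"

-- ===== PRECONDITION & SPEC =====
def Spec_preferred_user_mode (rows : List (List (String × String))) (current : String) (out : String) : Prop := out = preferred_user_mode_alt rows current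
instance (rows : List (List (String × String))) (current : String) (out : String) : Decidable (Spec_preferred_user_mode rows current out) := by unfold Spec_preferred_user_mode; infer_instance

-- ===== CLAIM (what is proved, stated in full; the proofs are below) =====
def Claim_equal_preferred_user_mode : Prop := ∀ (rows : List (List (String × String))) (current : String), Dom_preferred_user_mode rows current → Spec_preferred_user_mode rows current (preferred_user_mode rows current)

-- ===== LEMMAS AND PROOFS =====

-- proof-only helper: first eligible fallback as an Option
def pvFbOpt (rows : List (List (String × String))) : Option String :=
  match rows with
  | [] => none
  | row :: rest =>
    let mode_id := pvModeId row
    if mode_id ≠ "" ∧ PySem.Str.lower mode_id ≠ "auto" then some mode_id else pvFbOpt rest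

theorem pvFirstFallback_eq (rows : List (List (String × String))) :
    pvFirstFallback rows = (pvFbOpt rows).getD "general" := by
  induction rows with
  | nil => rfl
  | cons r rest ih =>
    simp only [pvFirstFallback, pvFbOpt]
    split_ifs with h <;> simp [ih]

theorem pvFold_spec (current : String) (rows : List (List (String × String)))
    (b : Bool) (o : Option String) :
    rows.foldl (pvStepB current) (b, o) =
      (b || rows.any (fun r => pvModeId r = current),
       match o with
       | some f => some f
       | none => pvFbOpt rows) := by
  induction rows generalizing b o with
  | nil => cases o <;> simp [List.foldl, pvFbOpt]
  | cons r rest ih =>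
    simp only [List.foldl, List.any_cons, pvStepB, pvFbOpt]
    cases o with
    | some f =>
      rw [ih]
      split_ifs with h <;> simp_all [pvModeId]
    | none =>
      rw [ih]
      split_ifs with h h2 <;> simp_all [pvModeId]

theorem pvMem_iff (current : String) (rows : List (List (String × String))) :
    (current ∈ PySem.Set.ofList (rows.map pvModeId)) ↔
      rows.any (fun r => pvModeId r = current) = true := by
  rw [PySem.Set.mem_ofList, List.mem_map]
  rw [List.any_eq_true]
  constructor
  · rintro ⟨r, hr, he⟩; exact ⟨r, hr, by simp [he]⟩
  · rintro ⟨r, hr, he⟩; exact ⟨r, hr, by simpa using he.symm⟩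

theorem preferred_user_mode_spec : Claim_equal_preferred_user_mode := by
  intro rows current _
  unfold Spec_preferred_user_mode preferred_user_mode preferred_user_mode_alt
  rw [pvFold_spec]
  simp only [Bool.false_or]
  by_cases h : current ∈ PySem.Set.ofList (rows.map pvModeId)
  · rw [if_pos h]
    have := (pvMem_iff current rows).mp h
    simp [this]
  · rw [if_neg h]
    have : rows.any (fun r => pvModeId r = current) = false := by
      rw [← Bool.not_eq_true]; exact fun hc => h ((pvMem_iff current rows).mpr hc)
    simp [this, pvFirstFallback_eq]
    cases pvFbOpt rows <;> simp
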